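-- pv_equiv track=rewrite | github.com/hnrq104/probability | montecarlo.py | dnf_bad_count
-- ===== SOURCE A (Python) =====
-- import itertools
--
-- def dnf_bad_count(assignment):
--     X = 0
--     variables = dict()
--     for clause in assignment:
--         for (v,_) in clause:
--             if v not in variables:
--                 variables[v] = len(variables)
--
--     n = len(variables)
--     for p in itertools.product([True,False],repeat=n):
--         ok = False
--         for clause in assignment:
--             aceita = True
--             for (var,bool_val) in clause:
--                 if p[variables[var]] is not bool_val:
--                     aceita = False
--             if aceita is True:
--                 ok = True
--                 break
--         if ok:
--             X+=1
--     return X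
-- ===== SOURCE B (Python) =====
-- def dnf_bad_count(assignment):
--     # Inclusion-exclusion over clauses: for each consistent subset of clauses,
--     # the assignments satisfying all of them number 2**(n - #fixed vars).
--     seen = set()
--     for clause in assignment:
--         for (v, _) in clause:
--             seen.add(v)
--     n = len(seen)
--
--     def g(clauses, partial):
--         # number of assignments extending `partial` that satisfy NO clause in `clauses`
--         if not clauses:
--             return 2 ** (n - len(partial))
--         c, rest = clauses[0], clauses[1:]
--         total = g(rest, partial)
--         merged = dict(partial)
--         ok = True
--         for (v, b) in c:
--             if v in merged and merged[v] != b: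
--                 ok = False
--                 break
--             merged[v] = b
--         if ok:
--             total -= g(rest, merged)
--         return total
--
--     return 2 ** n - g(assignment, {})
-- ===== Notes on version B (the rewrite author's own statement) =====
-- stated objective: faster
-- what changed: Replaces A's brute-force enumeration of all 2^n truth assignments with inclusion-exclusion over clause subsets: a recursion over the clause list that adds/subtracts 2^(n - #fixed vars) for each consistent partial assignment obtained by merging clauses.
import Mathlib
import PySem

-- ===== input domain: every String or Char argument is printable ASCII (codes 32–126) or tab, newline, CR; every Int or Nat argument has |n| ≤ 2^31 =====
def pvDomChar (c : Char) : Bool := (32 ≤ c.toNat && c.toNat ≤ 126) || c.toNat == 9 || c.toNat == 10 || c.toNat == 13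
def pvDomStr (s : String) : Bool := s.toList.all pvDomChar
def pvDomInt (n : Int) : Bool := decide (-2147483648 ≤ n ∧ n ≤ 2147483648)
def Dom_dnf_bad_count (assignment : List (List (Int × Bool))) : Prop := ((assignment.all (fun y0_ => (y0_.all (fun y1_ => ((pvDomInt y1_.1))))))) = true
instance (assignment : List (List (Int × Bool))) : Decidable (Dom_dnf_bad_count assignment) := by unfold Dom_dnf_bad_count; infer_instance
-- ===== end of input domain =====

-- B replaces A's enumeration of all 2^n truth assignments by inclusion–exclusion
-- over clause subsets (recursive, pruning inconsistent merges): an alternative exact algorithm.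

-- ===== PORT A =====
-- variables = dict(); for clause: for (v,_): if v not in variables: variables[v] = len(variables)
def pvRegVars (assignment : List (List (Int × Bool))) : PySem.Dict Int Int :=
  assignment.foldl
    (fun d clause => clause.foldl
      (fun d vb => if d.contains vb.1 then d else d.insert vb.1 (Int.ofNat d.size)) d)
    PySem.Dict.empty

-- itertools.product([True,False], repeat=n), first coordinate varying slowest
def pvProd : Nat → List (List Bool)
  | 0 => [[]]
  | n + 1 => [true, false].flatMap (fun b => (pvProd n).map (fun p => b :: p))

-- inner loop: aceita starts True, set to False on a mismatching literal (no break)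
def pvAceita (V : PySem.Dict Int Int) (p : List Bool) (c : List (Int × Bool)) : Bool :=
  c.foldl (fun a vb => if PySem.List.pyGet? p (V.getD vb.1 0) ≠ some vb.2 then false else a) true

-- middle loop with break: ok = first clause with aceita
def pvOk (V : PySem.Dict Int Int) (p : List Bool) : List (List (Int × Bool)) → Bool
  | [] => false
  | c :: rest => if pvAceita V p c then true else pvOk V p rest

def dnf_bad_count (assignment : List (List (Int × Bool))) : Int :=
  let vars := pvRegVars assignment
  let n := vars.size
  (pvProd n).foldl (fun X p => if pvOk vars p assignment then X + 1 else X) 0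

-- ===== PORT B =====
-- merged = dict(partial); for (v,b) in c: conflict → ok=False/break, else merged[v]=b
def pvMerge (m : PySem.Dict Int Bool) : List (Int × Bool) → Option (PySem.Dict Int Bool)
  | [] => some m
  | vb :: rest =>
    if m.contains vb.1 && (m.getD vb.1 false != vb.2) then none
    else pvMerge (m.insert vb.1 vb.2) rest

-- g(clauses, partial): assignments extending partial that satisfy no clause
def pvG (n : Nat) : List (List (Int × Bool)) → PySem.Dict Int Bool → Int
  | [], m => (2 : Int) ^ (n - m.size)
  | c :: rest, m =>
    let total := pvG n rest m
    (pvMerge m c).elim total (fun m' => total - pvG n rest m')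

def dnf_bad_count_alt (assignment : List (List (Int × Bool))) : Int :=
  let seen := assignment.foldl
    (fun s clause => clause.foldl (fun s vb => PySem.Set.add s vb.1) s) PySem.Set.empty
  let n := seen.length
  (2 : Int) ^ n - pvG n assignment PySem.Dict.empty

-- ===== PRECONDITION & SPEC =====
def Spec_dnf_bad_count (assignment : List (List (Int × Bool))) (out : Int) : Prop := out = dnf_bad_count_alt assignment
instance (assignment : List (List (Int × Bool))) (out : Int) : Decidable (Spec_dnf_bad_count assignment out) := by unfold Spec_dnf_bad_count; infer_instance

-- ===== CLAIM (what is proved, stated in full; the proofs are below) =====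
def Claim_equal_dnf_bad_count : Prop := ∀ (assignment : List (List (Int × Bool))), Dom_dnf_bad_count assignment → Spec_dnf_bad_count assignment (dnf_bad_count assignment)

-- ===== LEMMAS AND PROOFS =====

-- 0/1 count of a predicate over a list, as an Int
def pvCnt (l : List (List Bool)) (P : List Bool → Bool) : Int :=
  (l.map (fun p => if P p then (1 : Int) else 0)).sum

-- satisfaction of one clause / extension of a partial dict, literal by literal
def pvSatc (V : PySem.Dict Int Int) (p : List Bool) (c : List (Int × Bool)) : Bool :=
  c.all (fun vb => PySem.List.pyGet? p (V.getD vb.1 0) == some vb.2)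

def pvExt (V : PySem.Dict Int Int) (m : PySem.Dict Int Bool) (p : List Bool) : Bool :=
  m.items.all (fun vb => PySem.List.pyGet? p (V.getD vb.1 0) == some vb.2)

-- Nat-indexed constraint satisfaction
def pvExtN (L : List (Nat × Bool)) (p : List Bool) : Bool :=
  L.all (fun ib => p[ib.1]? == some ib.2)

def pvShift (L : List (Nat × Bool)) : List (Nat × Bool) :=
  L.filterMap (fun ib => match ib.1 with | 0 => none | Nat.succ i => some (i, ib.2))

def pvHeadOK (L : List (Nat × Bool)) (b : Bool) : Bool :=
  L.all (fun ib => ib.1 != 0 || (b == ib.2))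

theorem pvAceita_eq (V p c) : pvAceita V p c = pvSatc V p c := by
  unfold pvAceita pvSatc
  suffices h : ∀ (c : List (Int × Bool)) (a : Bool),
      c.foldl (fun a vb => if PySem.List.pyGet? p (V.getD vb.1 0) ≠ some vb.2 then false else a) a
        = (a && c.all (fun vb => PySem.List.pyGet? p (V.getD vb.1 0) == some vb.2)) by
    simpa using h c true
  intro c
  induction c with
  | nil => simp
  | cons vb rest ih =>
    intro a
    simp only [List.foldl_cons, List.all_cons, ih]
    by_cases h : PySem.List.pyGet? p (V.getD vb.1 0) = some vb.2 <;> simp [h]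

theorem pvOk_eq (V p cs) : pvOk V p cs = cs.any (fun c => pvSatc V p c) := by
  induction cs with
  | nil => rfl
  | cons c rest ih =>
    simp only [pvOk, pvAceita_eq, List.any_cons, ih]
    by_cases h : pvSatc V p c <;> simp [h]

theorem pvFoldl_count (l : List (List Bool)) (P : List Bool → Bool) (s : Int) :
    l.foldl (fun X p => if P p then X + 1 else X) s = s + pvCnt l P := by
  induction l generalizing s with
  | nil => simp [pvCnt]
  | cons p rest ih =>
    simp only [List.foldl_cons, pvCnt, List.map_cons, List.sum_cons] at *
    by_cases h : P p <;> · simp [h, ih]; try ring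

theorem pvCnt_congr (l : List (List Bool)) (P Q : List Bool → Bool)
    (h : ∀ p ∈ l, P p = Q p) : pvCnt l P = pvCnt l Q := by
  unfold pvCnt
  congr 1
  exact List.map_congr_left (fun p hp => by rw [h p hp])

theorem pvCnt_sub_point (l : List (List Bool)) (P Q R : List Bool → Bool)
    (h : ∀ p ∈ l, (if P p then (1 : Int) else 0) = (if Q p then (1 : Int) else 0) - (if R p then (1 : Int) else 0)) :
    pvCnt l P = pvCnt l Q - pvCnt l R := by
  induction l with
  | nil => simp [pvCnt]
  | cons p rest ih =>
    have h0 := h p (by simp)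
    have ih' := ih (fun q hq => h q (by simp [hq]))
    simp only [pvCnt, List.map_cons, List.sum_cons] at *
    rw [h0, ih']; ring

theorem pvCnt_append (l l' : List (List Bool)) (P : List Bool → Bool) :
    pvCnt (l ++ l') P = pvCnt l P + pvCnt l' P := by
  simp [pvCnt]

theorem pvCnt_add_split (l : List (List Bool)) (P : List Bool → Bool) :
    pvCnt l P + pvCnt l (fun p => ! P p) = (l.length : Int) := by
  induction l with
  | nil => simp [pvCnt]
  | cons p rest ih =>
    simp only [pvCnt, List.map_cons, List.sum_cons, List.length_cons] at *
    by_cases h : P p <;> simp only [h, Bool.not_true, Bool.not_false, if_true] <;>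
      push_cast <;> omega

theorem length_pvProd (n : Nat) : (pvProd n).length = 2 ^ n := by
  induction n with
  | zero => rfl
  | succ n ih => simp [pvProd, ih, Nat.pow_succ]; ring

theorem pvExtN_cons (L : List (Nat × Bool)) (b : Bool) (q : List Bool) :
    pvExtN L (b :: q) = (pvHeadOK L b && pvExtN (pvShift L) q) := by
  induction L with
  | nil => rfl
  | cons ib L ih =>
    obtain ⟨i, bb⟩ := ib
    cases i with
    | zero =>
      simp only [pvExtN, pvShift, pvHeadOK, List.all_cons, List.filterMap_cons] at *
      simp only [List.getElem?_cons_zero]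
      rw [show ((some b == some bb) : Bool) = (b == bb) by cases b <;> cases bb <;> rfl]
      rw [ih]
      cases b == bb <;> simp
    | succ i =>
      simp only [pvExtN, pvShift, pvHeadOK, List.all_cons, List.filterMap_cons] at *
      simp only [List.getElem?_cons_succ]
      rw [ih]
      cases (q[i]? == some bb) <;> simp

theorem pvShift_length (L : List (Nat × Bool)) :
    (pvShift L).length + L.countP (fun ib => ib.1 == 0) = L.length := by
  induction L with
  | nil => rfl
  | cons ib L ih =>
    obtain ⟨i, bb⟩ := ib
    cases i <;> simp [pvShift] at * <;> omega

theorem pvShift_fst_nodup {L : List (Nat × Bool)} (h : (L.map Prod.fst).Nodup) :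
    ((pvShift L).map Prod.fst).Nodup := by
  induction L with
  | nil => simp [pvShift]
  | cons ib L ih =>
    obtain ⟨i, bb⟩ := ib
    simp only [List.map_cons, List.nodup_cons] at h
    cases i with
    | zero => exact ih h.2
    | succ i =>
      simp only [pvShift, List.filterMap_cons, List.map_cons, List.nodup_cons]
      refine ⟨?_, ih h.2⟩
      intro hmem
      simp only [List.mem_map, List.mem_filterMap] at hmem
      obtain ⟨⟨j, bb'⟩, ⟨⟨j', bb''⟩, hmem', hj⟩, hfst⟩ := hmem
      cases j' with
      | zero => simp at hj
      | succ j' =>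
        simp only [Option.some.injEq, Prod.mk.injEq] at hj
        obtain ⟨rfl, rfl⟩ := hj
        simp only at hfst
        subst hfst
        exact h.1 (by simpa using List.mem_map_of_mem (f := Prod.fst) hmem')

theorem pvShift_fst_lt {n : Nat} {L : List (Nat × Bool)} (h : ∀ x ∈ L, x.1 < n + 1) :
    ∀ x ∈ pvShift L, x.1 < n := by
  intro x hx
  simp only [pvShift, List.mem_filterMap] at hx
  obtain ⟨⟨j, bb⟩, hmem, hj⟩ := hx
  cases j with
  | zero => simp at hj
  | succ j =>
    simp only [Option.some.injEq] at hj
    subst hj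
    have := h _ hmem
    simpa using Nat.lt_of_succ_lt_succ this

theorem pvNodup_lt_length_le {l : List Nat} {n : Nat} (hnd : l.Nodup) (hlt : ∀ x ∈ l, x < n) :
    l.length ≤ n := by
  classical
  have hcard : l.length = l.toFinset.card := (List.toFinset_card_of_nodup hnd).symm
  rw [hcard]
  have : l.toFinset ⊆ Finset.range n := by
    intro x hx
    simp only [List.mem_toFinset] at hx
    simpa using hlt x hx
  simpa using Finset.card_le_card this

theorem pvCnt_extN : ∀ (n : Nat) (L : List (Nat × Bool)), (L.map Prod.fst).Nodup →
    (∀ x ∈ L, x.1 < n) → pvCnt (pvProd n) (pvExtN L) = 2 ^ (n - L.length) := by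
  intro n
  induction n with
  | zero =>
    intro L hnd hlt
    have hL : L = [] := by
      cases L with
      | nil => rfl
      | cons x L => exact absurd (hlt x (by simp)) (by omega)
    subst hL
    simp [pvCnt, pvProd, pvExtN]
  | succ n ih =>
    intro L hnd hlt
    have hprod : pvProd (n + 1)
        = ((pvProd n).map (fun p => true :: p)) ++ ((pvProd n).map (fun p => false :: p)) := by
      simp [pvProd]
    have hmap : ∀ b : Bool, pvCnt ((pvProd n).map (fun p => b :: p)) (pvExtN L)
        = if pvHeadOK L b then pvCnt (pvProd n) (pvExtN (pvShift L)) else 0 := by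
      intro b
      unfold pvCnt
      rw [List.map_map]
      by_cases hb : pvHeadOK L b = true
      · simp only [hb, if_true]
        congr 1
        apply List.map_congr_left
        intro q hq
        simp [Function.comp, pvExtN_cons, hb]
      · have hb' : pvHeadOK L b = false := by simpa using hb
        rw [hb']
        simp only [Bool.false_eq_true, if_false]
        apply List.sum_eq_zero
        intro x hx
        obtain ⟨q, hq, rfl⟩ := List.mem_map.mp hx
        simp [Function.comp, pvExtN_cons, hb']
    have hshift := ih (pvShift L) (pvShift_fst_nodup hnd) (pvShift_fst_lt hlt)
    have hlen := pvShift_length L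
    have hbound : (pvShift L).length ≤ n :=
      pvNodup_lt_length_le (l := (pvShift L).map Prod.fst)
        (pvShift_fst_nodup hnd) (by
          intro x hx
          obtain ⟨y, hy, rfl⟩ := List.mem_map.mp hx
          exact pvShift_fst_lt hlt y hy) |>.trans_eq' (by simp)
    rw [hprod, pvCnt_append, hmap true, hmap false]
    cases hfz : L.filter (fun ib => ib.1 == 0) with
    | nil =>
      have hno : ∀ x ∈ L, x.1 ≠ 0 := by
        intro x hx h0
        have hmem : x ∈ L.filter (fun ib => ib.1 == 0) := List.mem_filter.mpr ⟨hx, by simp [h0]⟩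
        rw [hfz] at hmem
        simp at hmem
      have hHead : ∀ b, pvHeadOK L b = true := by
        intro b
        unfold pvHeadOK
        rw [List.all_eq_true]
        intro ib hib
        have := hno ib hib
        simp [this]
      have hcount : L.countP (fun ib => ib.1 == 0) = 0 := by
        rw [List.countP_eq_length_filter, hfz]
        rfl
      rw [hHead true, hHead false, hshift]
      simp only [if_true]
      have he : n - (pvShift L).length + 1 = n + 1 - L.length := by omega
      rw [← he, pow_succ]
      ring
    | cons z tl =>
      have hzfilter : z ∈ L.filter (fun ib => ib.1 == 0) := by rw [hfz]; simp
      have hzL : z ∈ L := List.mem_of_mem_filter hzfilter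
      have hz0 : z.1 = 0 := by simpa using List.of_mem_filter hzfilter
      have hsub : ((L.filter (fun ib => ib.1 == 0)).map Prod.fst).Nodup :=
        ((List.filter_sublist (l := L) (p := fun ib => ib.1 == 0)).map Prod.fst).nodup hnd
      have htl : tl = [] := by
        cases htl' : tl with
        | nil => rfl
        | cons w tw =>
          exfalso
          have hwfilter : w ∈ L.filter (fun ib => ib.1 == 0) := by rw [hfz, htl']; simp
          have hw0 : w.1 = 0 := by simpa using List.of_mem_filter hwfilter
          rw [hfz, htl'] at hsub
          simp only [List.map_cons, List.nodup_cons] at hsub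
          exact hsub.1 (by simp [hz0, hw0])
      subst htl
      have hone : ∀ x ∈ L, x.1 = 0 → x = z := by
        intro x hx h0
        have : x ∈ L.filter (fun ib => ib.1 == 0) := List.mem_filter.mpr ⟨hx, by simp [h0]⟩
        rw [hfz] at this
        simpa using this
      have hHead : ∀ b, pvHeadOK L b = (b == z.2) := by
        intro b
        unfold pvHeadOK
        cases hbz : (b == z.2) with
        | true =>
          rw [List.all_eq_true]
          intro ib hib
          by_cases h0 : ib.1 = 0
          · rw [hone ib hib h0]
            simp [hbz]
          · simp [h0]
        | false =>
          rw [List.all_eq_false]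
          exact ⟨z, hzL, by simp [hz0, hbz]⟩
      have hcount : L.countP (fun ib => ib.1 == 0) = 1 := by
        rw [List.countP_eq_length_filter, hfz]
        rfl
      have hL1 : 1 ≤ L.length := List.length_pos_of_mem hzL
      rw [hHead true, hHead false, hshift]
      have he : n - (pvShift L).length = n + 1 - L.length := by omega
      rw [he]
      cases z.2 <;> simp

-- invariant of the variable-index dictionary built by A
def pvVInv (V : PySem.Dict Int Int) : Prop :=
  V.keys.Nodup ∧ (∀ k j, V.get? k = some j → 0 ≤ j ∧ j < (V.size : Int)) ∧
    (∀ k k' j, V.get? k = some j → V.get? k' = some j → k = k')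

theorem pvFoldl_preserve {α β : Type} (P : α → Prop) (f : α → β → α)
    (hstep : ∀ a b, P a → P (f a b)) : ∀ (l : List β) (a : α), P a → P (l.foldl f a) := by
  intro l
  induction l with
  | nil => intro a ha; exact ha
  | cons b l ih => intro a ha; exact ih _ (hstep a b ha)

theorem pvVInv_step (d : PySem.Dict Int Int) (vb : Int × Bool) (hd : pvVInv d) :
    pvVInv (if d.contains vb.1 then d else d.insert vb.1 (Int.ofNat d.size)) := by
  by_cases hc : d.contains vb.1 = true
  · simpa [hc] using hd
  · have hc' : d.contains vb.1 = false := by simpa using hc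
    obtain ⟨hnd, hbd, hinj⟩ := hd
    simp only [hc', Bool.false_eq_true, if_false]
    refine ⟨PySem.Dict.nodup_keys_insert _ _ _ hnd, ?_, ?_⟩
    · intro k j hget
      rw [PySem.Dict.get?_insert] at hget
      rw [PySem.Dict.size_insert, hc']
      simp only [Bool.false_eq_true, if_false]
      split_ifs at hget with hk
      · have hj : j = Int.ofNat d.size := by simpa using hget.symm
        subst hj
        simp only [Int.ofNat_eq_natCast]
        push_cast
        omega
      · have := hbd k j hget
        push_cast
        omega
    · intro k k' j h1 h2
      rw [PySem.Dict.get?_insert] at h1 h2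
      split_ifs at h1 h2 with hk hk' hk'
      · rw [hk, hk']
      · exfalso
        have hj : j = Int.ofNat d.size := by simpa using h1.symm
        subst hj
        have := (hbd k' _ h2).2
        simp only [Int.ofNat_eq_natCast] at this
        omega
      · exfalso
        have hj : j = Int.ofNat d.size := by simpa using h2.symm
        subst hj
        have := (hbd k _ h1).2
        simp only [Int.ofNat_eq_natCast] at this
        omega
      · exact hinj k k' j h1 h2

theorem pvRegVars_inv (a : List (List (Int × Bool))) : pvVInv (pvRegVars a) := by
  unfold pvRegVars
  apply pvFoldl_preserve pvVInv _ (fun d c hd => pvFoldl_preserve pvVInv _ pvVInv_step c d hd)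
  refine ⟨PySem.Dict.nodup_keys_empty, ?_, ?_⟩
  · intro k j h
    rw [PySem.Dict.get?_empty] at h
    exact absurd h (by simp)
  · intro k k' j h
    rw [PySem.Dict.get?_empty] at h
    exact absurd h (by simp)

theorem pvStep_mono {d : PySem.Dict Int Int} {x : Int} (h : d.contains x = true)
    (vb : Int × Bool) :
    (if d.contains vb.1 then d else d.insert vb.1 (Int.ofNat d.size)).contains x = true := by
  by_cases hc : d.contains vb.1 = true
  · simpa [hc]
  · have hc' : d.contains vb.1 = false := by simpa using hc
    simp [hc', PySem.Dict.contains_insert, h]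

theorem pvFoldC_mono {x : Int} :
    ∀ (c : List (Int × Bool)) (d : PySem.Dict Int Int), d.contains x = true →
    (c.foldl (fun d vb => if d.contains vb.1 then d else d.insert vb.1 (Int.ofNat d.size)) d).contains x = true :=
  fun c d h => pvFoldl_preserve (fun d' => d'.contains x = true) _ (fun _ vb hd => pvStep_mono hd vb) c d h

theorem pvFoldA_mono {x : Int} :
    ∀ (a : List (List (Int × Bool))) (d : PySem.Dict Int Int), d.contains x = true →
    (a.foldl (fun d clause => clause.foldl
      (fun d vb => if d.contains vb.1 then d else d.insert vb.1 (Int.ofNat d.size)) d) d).contains x = true :=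
  fun a d h => pvFoldl_preserve (fun d => d.contains x = true) _
    (fun d c hd => pvFoldC_mono c d hd) a d h

theorem pvFoldC_self {vb : Int × Bool} :
    ∀ (c : List (Int × Bool)) (d : PySem.Dict Int Int), vb ∈ c →
    (c.foldl (fun d vb => if d.contains vb.1 then d else d.insert vb.1 (Int.ofNat d.size)) d).contains vb.1 = true := by
  intro c
  induction c with
  | nil => intro d h; simp at h
  | cons w c ih =>
    intro d h
    simp only [List.foldl_cons]
    rcases List.mem_cons.mp h with rfl | h
    · apply pvFoldC_mono
      by_cases hc : d.contains vb.1 = true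
      · simp [hc]
      · have hc' : d.contains vb.1 = false := by simpa using hc
        simp [hc', PySem.Dict.contains_insert_self]
    · exact ih _ h

theorem pvFoldA_self {c : List (Int × Bool)} {vb : Int × Bool} (hvb : vb ∈ c) :
    ∀ (a : List (List (Int × Bool))) (d : PySem.Dict Int Int), c ∈ a →
    (a.foldl (fun d clause => clause.foldl
      (fun d vb => if d.contains vb.1 then d else d.insert vb.1 (Int.ofNat d.size)) d) d).contains vb.1 = true := by
  intro a
  induction a with
  | nil => intro d h; simp at h
  | cons c0 a ih =>
    intro d h
    simp only [List.foldl_cons]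
    rcases List.mem_cons.mp h with rfl | h
    · exact pvFoldA_mono a _ (pvFoldC_self c _ hvb)
    · exact ih _ h

theorem pvRegVars_contains {a : List (List (Int × Bool))} {c : List (Int × Bool)}
    {vb : Int × Bool} (hc : c ∈ a) (hvb : vb ∈ c) :
    (pvRegVars a).contains vb.1 = true := by
  unfold pvRegVars
  exact pvFoldA_self hvb a _ hc

theorem pvRegVars_size (a : List (List (Int × Bool))) :
    (pvRegVars a).size =
      (a.foldl (fun s clause => clause.foldl (fun s vb => PySem.Set.add s vb.1) s)
        PySem.Set.empty).length := by
  have hkeys : ∀ (a : List (List (Int × Bool))) (d : PySem.Dict Int Int) (s : PySem.Set Int),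
      d.keys = s →
      (a.foldl (fun d clause => clause.foldl
        (fun d vb => if d.contains vb.1 then d else d.insert vb.1 (Int.ofNat d.size)) d) d).keys
        = a.foldl (fun s clause => clause.foldl (fun s vb => PySem.Set.add s vb.1) s) s := by
    intro a
    induction a with
    | nil => intro d s h; simpa using h
    | cons c a iha =>
      intro d s h
      simp only [List.foldl_cons]
      apply iha
      clear iha
      induction c generalizing d s with
      | nil => simpa using h
      | cons vb c ihc =>
        simp only [List.foldl_cons]
        apply ihc
        by_cases hc : d.contains vb.1 = true
        · have hmem : vb.1 ∈ s := by
            rw [← h]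
            exact (PySem.Dict.contains_iff_mem_keys d vb.1).mp hc
          simp [hc, PySem.Set.add, hmem, h]
        · have hc' : d.contains vb.1 = false := by simpa using hc
          have hmem : vb.1 ∉ s := by
            intro hcon
            rw [← h, ← PySem.Dict.contains_iff_mem_keys] at hcon
            rw [hc'] at hcon
            exact Bool.false_ne_true hcon
          rw [hc']
          simp only [Bool.false_eq_true, if_false]
          rw [PySem.Dict.keys_insert_of_not_contains d _ hc', h]
          simp [PySem.Set.add, hmem]
  have hsz : ∀ (d : PySem.Dict Int Int), d.size = d.keys.length := by
    intro d
    simp [PySem.Dict.size, PySem.Dict.keys]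
  rw [hsz]
  unfold pvRegVars
  rw [hkeys a PySem.Dict.empty PySem.Set.empty (by simp [PySem.Dict.keys_empty, PySem.Set.empty])]

theorem pvInsert_same {m : PySem.Dict Int Bool} {v : Int} {b : Bool}
    (hnd : m.keys.Nodup) (h : m.get? v = some b) : m.insert v b = m := by
  apply PySem.Dict.ext
  rw [PySem.Dict.items_insert_of_contains m b (by rw [PySem.Dict.contains_eq_isSome_get?, h]; rfl)]
  conv_rhs => rw [← List.map_id m.items]
  apply List.map_congr_left
  intro x hx
  obtain ⟨x1, x2⟩ := x
  by_cases hxv : x1 = v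
  · subst hxv
    have : m.get? x1 = some x2 := PySem.Dict.get?_of_mem_items m hx hnd
    rw [h] at this
    obtain rfl : b = x2 := by simpa using this
    simp
  · simp [hxv]

theorem pvExt_insert_fresh (V : PySem.Dict Int Int) {m : PySem.Dict Int Bool} {v : Int} {b : Bool}
    (h : m.get? v = none) (p : List Bool) :
    pvExt V (m.insert v b) p
      = (pvExt V m p && (PySem.List.pyGet? p (V.getD v 0) == some b)) := by
  unfold pvExt
  rw [PySem.Dict.items_insert_of_not_contains m b
    ((PySem.Dict.get?_eq_none_iff_contains m v).mp h)]
  simp [List.all_append]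

theorem pvExt_lit (V : PySem.Dict Int Int) {m : PySem.Dict Int Bool} {v : Int} {b : Bool}
    (h : m.get? v = some b) (p : List Bool) :
    (pvExt V m p && (PySem.List.pyGet? p (V.getD v 0) == some b)) = pvExt V m p := by
  cases hext : pvExt V m p with
  | false => simp
  | true =>
    have hlit := (List.all_eq_true.mp hext) _ (PySem.Dict.mem_items_of_get?_eq_some m h)
    simp only at hlit
    simp [hlit]

theorem pvMerge_none_ext (V : PySem.Dict Int Int) :
    ∀ (c : List (Int × Bool)) (m : PySem.Dict Int Bool), m.keys.Nodup →
    pvMerge m c = none → ∀ p, (pvExt V m p && pvSatc V p c) = false := by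
  intro c
  induction c with
  | nil => intro m hnd hmer p; simp [pvMerge] at hmer
  | cons vb rest ih =>
    intro m hnd hmer p
    unfold pvMerge at hmer
    unfold pvSatc
    simp only [List.all_cons]
    cases hget : m.get? vb.1 with
    | none =>
      have hC : (m.contains vb.1 && (m.getD vb.1 false != vb.2)) = false := by
        rw [PySem.Dict.contains_eq_isSome_get?, hget]
        rfl
      rw [hC] at hmer
      simp only [Bool.false_eq_true, if_false] at hmer
      have := ih (m.insert vb.1 vb.2) (PySem.Dict.nodup_keys_insert _ _ _ hnd) hmer p
      rw [pvExt_insert_fresh V hget] at this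
      unfold pvSatc at this
      rw [← Bool.and_assoc]
      exact this
    | some b' =>
      by_cases hne : b' = vb.2
      · subst hne
        have hC : (m.contains vb.1 && (m.getD vb.1 false != vb.2)) = false := by
          rw [PySem.Dict.getD_of_get?_eq_some m false hget]
          simp
        rw [hC] at hmer
        simp only [Bool.false_eq_true, if_false] at hmer
        rw [pvInsert_same hnd hget] at hmer
        have := ih m hnd hmer p
        unfold pvSatc at this
        rw [← Bool.and_assoc, pvExt_lit V hget]
        exact this
      · have hlit : (PySem.List.pyGet? p (V.getD vb.1 0) == some vb.2) = true →
            pvExt V m p = false := by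
          intro hl
          cases hext : pvExt V m p with
          | false => rfl
          | true =>
            exfalso
            have hb' := (List.all_eq_true.mp hext) _ (PySem.Dict.mem_items_of_get?_eq_some m hget)
            simp only [beq_iff_eq] at hb' hl
            rw [hl] at hb'
            exact hne (by simpa using hb'.symm)
        cases hl : (PySem.List.pyGet? p (V.getD vb.1 0) == some vb.2) with
        | false => simp
        | true => simp [hlit hl]

theorem pvMerge_some_ext (V : PySem.Dict Int Int) :
    ∀ (c : List (Int × Bool)) (m m' : PySem.Dict Int Bool), m.keys.Nodup →
    pvMerge m c = some m' → ∀ p, pvExt V m' p = (pvExt V m p && pvSatc V p c) := by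
  intro c
  induction c with
  | nil =>
    intro m m' hnd hmer p
    simp only [pvMerge, Option.some.injEq] at hmer
    subst hmer
    simp [pvSatc]
  | cons vb rest ih =>
    intro m m' hnd hmer p
    unfold pvMerge at hmer
    unfold pvSatc
    simp only [List.all_cons]
    cases hC : (m.contains vb.1 && (m.getD vb.1 false != vb.2)) with
    | true =>
      rw [hC] at hmer
      simp at hmer
    | false =>
      rw [hC] at hmer
      simp only [Bool.false_eq_true, if_false] at hmer
      cases hget : m.get? vb.1 with
      | none =>
        have := ih _ _ (PySem.Dict.nodup_keys_insert _ _ _ hnd) hmer p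
        rw [pvExt_insert_fresh V hget] at this
        unfold pvSatc at this
        rw [this, Bool.and_assoc]
      | some b' =>
        have hne : b' = vb.2 := by
          by_contra hne
          rw [PySem.Dict.contains_eq_isSome_get?, hget,
            PySem.Dict.getD_of_get?_eq_some m false hget] at hC
          simp [hne] at hC
        subst hne
        rw [pvInsert_same hnd hget] at hmer
        have := ih _ _ hnd hmer p
        unfold pvSatc at this
        rw [this, ← Bool.and_assoc, pvExt_lit V hget]

theorem pvMerge_some_keys :
    ∀ (c : List (Int × Bool)) (m m' : PySem.Dict Int Bool), m.keys.Nodup →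
    pvMerge m c = some m' →
    m'.keys.Nodup ∧ (∀ k ∈ m'.keys, k ∈ m.keys ∨ k ∈ c.map Prod.fst) := by
  intro c
  induction c with
  | nil =>
    intro m m' hnd hmer
    simp only [pvMerge, Option.some.injEq] at hmer
    subst hmer
    exact ⟨hnd, fun k hk => Or.inl hk⟩
  | cons vb rest ih =>
    intro m m' hnd hmer
    unfold pvMerge at hmer
    cases hC : (m.contains vb.1 && (m.getD vb.1 false != vb.2)) with
    | true =>
      rw [hC] at hmer
      simp at hmer
    | false =>
      rw [hC] at hmer
      simp only [Bool.false_eq_true, if_false] at hmer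
      obtain ⟨h1, h2⟩ := ih _ _ (PySem.Dict.nodup_keys_insert _ _ _ hnd) hmer
      refine ⟨h1, fun k hk => ?_⟩
      rcases h2 k hk with hk' | hk'
      · rcases (PySem.Dict.mem_keys_insert m vb.1 k vb.2).mp hk' with rfl | hk''
        · exact Or.inr (by simp)
        · exact Or.inl hk''
      · exact Or.inr (by simp [hk'])

theorem pvAll_congr {α : Type} (l : List α) (f g : α → Bool)
    (h : ∀ x ∈ l, f x = g x) : l.all f = l.all g := by
  induction l with
  | nil => rfl
  | cons a l ih => simp [h a (by simp), ih (fun x hx => h x (by simp [hx]))]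

theorem pvExt_base (V : PySem.Dict Int Int) (m : PySem.Dict Int Bool)
    (hV : pvVInv V) (hnd : m.keys.Nodup) (hk : ∀ k ∈ m.keys, V.contains k = true) :
    pvCnt (pvProd V.size) (pvExt V m) = 2 ^ (V.size - m.size) := by
  obtain ⟨hVnd, hbd, hinj⟩ := hV
  have hidx : ∀ vb ∈ m.items, ∃ j : Int, V.get? vb.1 = some j ∧ V.getD vb.1 0 = j ∧
      0 ≤ j ∧ j < (V.size : Int) := by
    intro vb hvb
    have hc : V.contains vb.1 = true := hk _ (PySem.Dict.mem_keys_of_mem_items m hvb)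
    rw [PySem.Dict.contains_eq_isSome_get?] at hc
    cases hg : V.get? vb.1 with
    | none => rw [hg] at hc; simp at hc
    | some j =>
      exact ⟨j, rfl, PySem.Dict.getD_of_get?_eq_some V 0 hg, (hbd _ _ hg).1, (hbd _ _ hg).2⟩
  have hpt : ∀ p ∈ pvProd V.size, pvExt V m p
      = pvExtN (m.items.map (fun vb => ((V.getD vb.1 0).toNat, vb.2))) p := by
    intro p hp
    unfold pvExt pvExtN
    rw [List.all_map]
    apply pvAll_congr
    intro vb hvb
    obtain ⟨j, hg, hgd, h0, hlt⟩ := hidx vb hvb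
    simp only [Function.comp]
    rw [hgd, PySem.List.pyGet?_of_nonneg p h0]
  rw [pvCnt_congr _ _ _ hpt]
  have hitems : m.items.Nodup := by
    have : m.keys = m.items.map Prod.fst := by simp [PySem.Dict.keys]
    rw [this] at hnd
    exact hnd.of_map
  have hlen : (m.items.map (fun vb => ((V.getD vb.1 0).toNat, vb.2))).length = m.size := by
    simp [PySem.Dict.size]
  rw [pvCnt_extN V.size _ ?_ ?_, hlen]
  · rw [List.map_map]
    apply List.Nodup.map_on ?_ hitems
    intro vb hvb vb' hvb' heq
    simp only [Function.comp_apply] at heq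
    obtain ⟨j, hg, hgd, h0, _⟩ := hidx vb hvb
    obtain ⟨j', hg', hgd', h0', _⟩ := hidx vb' hvb'
    rw [hgd, hgd'] at heq
    have hj : j = j' := by omega
    subst hj
    have hk1 : vb.1 = vb'.1 := hinj _ _ _ hg hg'
    have hkeys : m.keys = m.items.map Prod.fst := by simp [PySem.Dict.keys]
    rw [hkeys] at hnd
    exact List.inj_on_of_nodup_map hnd hvb hvb' hk1
  · intro x hx
    obtain ⟨vb, hvb, rfl⟩ := List.mem_map.mp hx
    obtain ⟨j, hg, hgd, h0, hlt⟩ := hidx vb hvb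
    simp only [hgd]
    omega

theorem pvInd_arith (E B R : Bool) :
    (if (E && !(B || R)) = true then (1 : Int) else 0)
      = (if (E && !R) = true then (1 : Int) else 0)
        - (if ((E && B) && !R) = true then (1 : Int) else 0) := by
  cases E <;> cases B <;> cases R <;> simp

theorem pvG_eq (V : PySem.Dict Int Int) (hV : pvVInv V) :
    ∀ (cs : List (List (Int × Bool))) (m : PySem.Dict Int Bool),
    (∀ c ∈ cs, ∀ vb ∈ c, V.contains vb.1 = true) →
    m.keys.Nodup → (∀ k ∈ m.keys, V.contains k = true) →
    pvG V.size cs m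
      = pvCnt (pvProd V.size) (fun p => pvExt V m p && !(cs.any (fun c => pvSatc V p c))) := by
  intro cs
  induction cs with
  | nil =>
    intro m hcs hnd hk
    unfold pvG
    rw [← pvExt_base V m ⟨hV.1, hV.2.1, hV.2.2⟩ hnd hk]
    apply pvCnt_congr
    intro p hp
    simp
  | cons c rest ih =>
    intro m hcs hnd hk
    unfold pvG
    cases hmer : pvMerge m c with
    | none =>
      rw [ih m (fun c' hc' => hcs c' (by simp [hc'])) hnd hk]
      apply pvCnt_congr
      intro p hp
      have h0 := pvMerge_none_ext V c m hnd hmer p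
      simp only [List.any_cons]
      cases hE : pvExt V m p <;> cases hB : pvSatc V p c <;>
        cases hR : rest.any (fun c => pvSatc V p c) <;> simp_all
    | some m' =>
      simp only [Option.elim]
      obtain ⟨hnd', hkeys'⟩ := pvMerge_some_keys c m m' hnd hmer
      have hk' : ∀ k ∈ m'.keys, V.contains k = true := by
        intro k hkm
        rcases hkeys' k hkm with h | h
        · exact hk k h
        · obtain ⟨vb, hvb, rfl⟩ := List.mem_map.mp h
          exact hcs c (by simp) vb hvb
      rw [ih m (fun c' hc' => hcs c' (by simp [hc'])) hnd hk,
        ih m' (fun c' hc' => hcs c' (by simp [hc'])) hnd' hk']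
      refine (pvCnt_sub_point _ _ _ _ ?_).symm
      intro p hp
      have hext' := pvMerge_some_ext V c m m' hnd hmer p
      simp only [List.any_cons, hext']
      exact pvInd_arith _ _ _

-- ===== VERDICT (by name: the statement is the Claim_ definition above) =====
theorem dnf_bad_count_spec : Claim_equal_dnf_bad_count := by
  unfold Claim_equal_dnf_bad_count
  intro a _
  unfold Spec_dnf_bad_count dnf_bad_count dnf_bad_count_alt
  simp only []
  have hinv := pvRegVars_inv a
  have hn : (a.foldl (fun s clause => clause.foldl (fun s vb => PySem.Set.add s vb.1) s)
      PySem.Set.empty).length = (pvRegVars a).size := (pvRegVars_size a).symm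
  rw [hn, pvFoldl_count, pvCnt_congr _ _ (fun p => a.any (fun c => pvSatc (pvRegVars a) p c))
    (fun p _ => pvOk_eq (pvRegVars a) p a)]
  have hG := pvG_eq (pvRegVars a) hinv a PySem.Dict.empty
    (fun c hc vb hvb => pvRegVars_contains hc hvb)
    PySem.Dict.nodup_keys_empty (by simp [PySem.Dict.keys_empty])
  rw [hG, pvCnt_congr (pvProd (pvRegVars a).size)
    (fun p => pvExt (pvRegVars a) PySem.Dict.empty p
      && !(a.any (fun c => pvSatc (pvRegVars a) p c)))
    (fun p => !(a.any (fun c => pvSatc (pvRegVars a) p c)))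
    (fun p _ => by
      show (pvExt (pvRegVars a) PySem.Dict.empty p && _) = _
      rw [show pvExt (pvRegVars a) PySem.Dict.empty p = true from rfl]
      simp)]
  have hsplit := pvCnt_add_split (pvProd (pvRegVars a).size)
    (fun p => a.any (fun c => pvSatc (pvRegVars a) p c))
  rw [length_pvProd] at hsplit
  push_cast at hsplit ⊢
  linarith [hsplit]
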